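-- pv_equiv track=rewrite | github.com/zeroam/TIL | codeit/algorithm/greedy_min_fee.py | min_fee
-- ===== SOURCE A (Python) =====
-- def min_fee(pages_to_print):
--     sorted_pages_to_print = sorted(pages_to_print)
--
--     total_fee = 0
--     while sorted_pages_to_print:
--         size = len(sorted_pages_to_print)
--         minute = sorted_pages_to_print.pop(0)
--         total_fee += size * minute
--
--     return total_fee
-- ===== SOURCE B (Python) =====
-- def min_fee(pages_to_print):
--     total = 0
--     running = 0
--     for page in sorted(pages_to_print):
--         running += page
--         total += running
--     return total
-- ===== Notes on version B (the rewrite author's own statement) =====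
-- stated objective: faster
-- what changed: Replaces A's destructive pop(0)-from-a-shrinking-list loop (weight = remaining length each step) with a single non-mutating prefix-sum pass over the sorted list.
import Mathlib
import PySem

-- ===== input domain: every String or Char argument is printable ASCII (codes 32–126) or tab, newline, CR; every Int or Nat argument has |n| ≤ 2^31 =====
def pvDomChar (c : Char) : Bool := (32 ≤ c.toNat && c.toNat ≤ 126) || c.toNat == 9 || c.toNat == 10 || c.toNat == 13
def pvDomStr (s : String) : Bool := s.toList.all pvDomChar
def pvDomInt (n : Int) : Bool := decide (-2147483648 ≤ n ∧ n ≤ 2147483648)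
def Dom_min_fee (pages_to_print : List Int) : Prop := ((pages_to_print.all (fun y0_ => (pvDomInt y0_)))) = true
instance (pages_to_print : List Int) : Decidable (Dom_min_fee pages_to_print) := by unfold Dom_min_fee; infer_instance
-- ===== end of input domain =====

-- B replaces A's destructive pop(0) loop (weight = remaining length) with one
-- non-mutating prefix-sum pass over the sorted list; objective: simpler.

-- ===== PORT A =====
-- the while loop: pop the head, add (current length) * head to the accumulator
def minFeeLoopA : List Int → Int → Int
  | [], total_fee => total_fee
  | minute :: rest, total_fee =>
      minFeeLoopA rest (total_fee + ((minute :: rest).length : Int) * minute)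

def min_fee (pages_to_print : List Int) : Int :=
  minFeeLoopA (PySem.List.sorted pages_to_print (fun x => x) false) 0

-- ===== PORT B =====
def min_fee_alt (pages_to_print : List Int) : Int :=
  ((PySem.List.sorted pages_to_print (fun x => x) false).foldl
      (fun (rt : Int × Int) page => (rt.1 + page, rt.2 + (rt.1 + page))) (0, 0)).2

-- ===== PRECONDITION & SPEC =====
def Spec_min_fee (pages_to_print : List Int) (out : Int) : Prop := out = min_fee_alt pages_to_print
instance (pages_to_print : List Int) (out : Int) : Decidable (Spec_min_fee pages_to_print out) := by unfold Spec_min_fee; infer_instance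

-- ===== CLAIM (what is proved, stated in full; the proofs are below) =====
def Claim_equal_min_fee : Prop := ∀ (pages_to_print : List Int), Dom_min_fee pages_to_print → Spec_min_fee pages_to_print (min_fee pages_to_print)

-- ===== LEMMAS AND PROOFS =====
theorem minFeeLoopA_acc (l : List Int) (a : Int) :
    minFeeLoopA l a = a + minFeeLoopA l 0 := by
  induction l generalizing a with
  | nil => simp [minFeeLoopA]
  | cons x xs ih =>
      simp only [minFeeLoopA]
      rw [ih, ih (0 + _)]
      ring

theorem foldl_snd_eq (l : List Int) (r t : Int) :
    (l.foldl (fun (rt : Int × Int) page => (rt.1 + page, rt.2 + (rt.1 + page))) (r, t)).2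
      = t + (l.length : Int) * r + minFeeLoopA l 0 := by
  induction l generalizing r t with
  | nil => simp [minFeeLoopA]
  | cons x xs ih =>
      simp only [List.foldl, minFeeLoopA, List.length_cons]
      rw [ih, minFeeLoopA_acc xs (0 + (((xs.length + 1 : Nat)) : Int) * x)]
      push_cast
      ring

-- ===== VERDICT (by name: the statement is the Claim_ definition above) =====
theorem min_fee_spec : Claim_equal_min_fee := by
  intro pages _
  unfold Spec_min_fee min_fee min_fee_alt
  rw [foldl_snd_eq, minFeeLoopA_acc]
  simp
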